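-- pv_equiv track=rewrite | github.com/TOMOFUMI-KONDO/atcoder | abc/247_e_2.py | calc
-- ===== SOURCE A (Python) =====
-- def calc(A):
--     ret, i = 0, 0
--     for a in A:
--         if a == 0:
--             i += 1
--         else:
--             ret += (i * (i + 1)) // 2
--             i = 0
--
--     ret += (i * (i + 1)) // 2
--     return ret
-- ===== SOURCE B (Python) =====
-- def calc(A):
--     # Stage 1: for each position, the length of the zero-run ending there
--     # (0 when the element is nonzero). Stage 2: sum them; each zero's
--     # run-length-ending-here counts the zero subarrays ending at it.
--     z = []
--     run = 0
--     for a in A: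
--         run = run + 1 if a == 0 else 0
--         z.append(run)
--     return sum(z)
-- ===== Notes on version B (the rewrite author's own statement) =====
-- stated objective: alternative
-- what changed: Replaces the per-run triangular closed form with a post-loop flush by a two-stage computation: first a scan building, per position, the length of the zero-run ending there (the count of zero subarrays ending at that index), then a plain sum of that list; no division and no flush.
import Mathlib
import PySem

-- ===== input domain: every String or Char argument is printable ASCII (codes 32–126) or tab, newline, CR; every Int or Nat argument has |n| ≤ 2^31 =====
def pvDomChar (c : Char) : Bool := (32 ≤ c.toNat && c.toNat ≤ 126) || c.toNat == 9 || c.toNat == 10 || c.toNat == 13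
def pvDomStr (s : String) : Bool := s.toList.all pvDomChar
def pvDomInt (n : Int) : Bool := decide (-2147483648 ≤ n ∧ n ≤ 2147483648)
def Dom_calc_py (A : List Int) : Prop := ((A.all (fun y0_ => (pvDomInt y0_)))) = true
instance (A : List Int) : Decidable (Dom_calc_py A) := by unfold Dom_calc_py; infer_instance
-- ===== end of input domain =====

-- B: two-stage — scan producing, per position, the zero-run length ending there, then sum that
-- list; instead of A's per-run triangular closed form with a post-loop flush.
-- ===== PORT A =====
def calcStepA (s : Int × Int) (a : Int) : Int × Int :=
  if a = 0 then (s.1, s.2 + 1) else (s.1 + PySem.Int.floordiv (s.2 * (s.2 + 1)) 2, 0)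

def calc_py (A : List Int) : Int :=
  let s := A.foldl calcStepA (0, 0)
  s.1 + PySem.Int.floordiv (s.2 * (s.2 + 1)) 2

-- ===== PORT B =====
-- Stage 1 of Source B: the list z of run-lengths-ending-at-each-position.
def calcScan : List Int → Int → List Int
  | [], _ => []
  | a :: t, run =>
    let r := if a = 0 then run + 1 else 0
    r :: calcScan t r

def calc_py_alt (A : List Int) : Int :=
  (calcScan A 0).sum

-- ===== PRECONDITION & SPEC =====
def Spec_calc_py (A : List Int) (out : Int) : Prop := out = calc_py_alt A
instance (A : List Int) (out : Int) : Decidable (Spec_calc_py A out) := by unfold Spec_calc_py; infer_instance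

-- ===== CLAIM (what is proved, stated in full; the proofs are below) =====
def Claim_equal_calc_py : Prop := ∀ (A : List Int), Dom_calc_py A → Spec_calc_py A (calc_py A)

-- ===== LEMMAS AND PROOFS =====

theorem calc_tri_succ (i : Int) :
    PySem.Int.floordiv ((i + 1) * (i + 1 + 1)) 2
      = PySem.Int.floordiv (i * (i + 1)) 2 + (i + 1) := by
  obtain ⟨k, hk⟩ := Int.even_mul_succ_self i
  have h1 : i * (i + 1) = 2 * k := by omega
  have h2 : (i + 1) * (i + 1 + 1) = 2 * (k + (i + 1)) := by nlinarith
  rw [h1, h2, PySem.Int.floordiv_eq_ediv_of_pos (by omega), PySem.Int.floordiv_eq_ediv_of_pos (by omega),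
    Int.mul_ediv_cancel_left _ (by omega), Int.mul_ediv_cancel_left _ (by omega)]

theorem calc_invariant (A : List Int) (r i : Int) :
    (A.foldl calcStepA (r, i)).1
      + PySem.Int.floordiv ((A.foldl calcStepA (r, i)).2 * ((A.foldl calcStepA (r, i)).2 + 1)) 2
      = r + PySem.Int.floordiv (i * (i + 1)) 2 + (calcScan A i).sum := by
  induction A generalizing r i with
  | nil => simp [calcScan]
  | cons a t ih =>
    by_cases h : a = 0
    · simp only [List.foldl_cons, calcStepA, calcScan, h, if_true]
      rw [ih r (i + 1), calc_tri_succ]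
      simp only [List.sum_cons]; ring
    · simp only [List.foldl_cons, calcStepA, calcScan, if_neg h]
      rw [ih (r + PySem.Int.floordiv (i * (i + 1)) 2) 0]
      simp only [List.sum_cons]
      simp [PySem.Int.floordiv]

-- ===== VERDICT (by name: the statement is the Claim_ definition above) =====
theorem calc_py_spec : Claim_equal_calc_py := by
  intro A _
  unfold Spec_calc_py calc_py calc_py_alt
  have := calc_invariant A 0 0
  simpa [PySem.Int.floordiv] using this
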